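-- pv_equiv track=rewrite | github.com/JRBusiness/midimap | gui.py | validate_key_combination
-- ===== SOURCE A (Python) =====
-- def validate_key_combination(key_str: str) -> bool:
--     """Validate that the key combination format is correct"""
--     if not key_str:
--         return False
--
--     # Valid modifiers
--     valid_modifiers = {'ctrl', 'shift', 'alt'}
--
--     # Split by '+'
--     parts = key_str.split('+')
--
--     # Check that all parts except the last are valid modifiers
--     if len(parts) > 1:
--         modifiers = parts[:-1]
--         for mod in modifiers:
--             if mod not in valid_modifiers:
--                 return False
--
--     # Last part should be a valid key (single character or special key)
--     last_part = parts[-1]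
--
--     # Check if it's a single character
--     if len(last_part) == 1 and last_part.isalnum():
--         return True
--
--     # Check if it's a valid special key
--     valid_special = {
--         'space', 'enter', 'tab', 'esc', 'backspace', 'delete', 'insert',
--         'up', 'down', 'left', 'right',
--         'home', 'end', 'page_up', 'page_down',
--         'f1', 'f2', 'f3', 'f4', 'f5', 'f6', 'f7', 'f8', 'f9', 'f10', 'f11', 'f12'
--     }
--
--     if last_part in valid_special:
--         return True
--
--     return False
-- ===== SOURCE B (Python) =====
-- _VALID_SPECIAL = frozenset({
--     'space', 'enter', 'tab', 'esc', 'backspace', 'delete', 'insert',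
--     'up', 'down', 'left', 'right',
--     'home', 'end', 'page_up', 'page_down',
--     'f1', 'f2', 'f3', 'f4', 'f5', 'f6', 'f7', 'f8', 'f9', 'f10', 'f11', 'f12'
-- })
--
--
-- def validate_key_combination(key_str: str) -> bool:
--     """Validate a key combination by recursively stripping modifier prefixes."""
--     for prefix in ('ctrl+', 'shift+', 'alt+'):
--         if key_str.startswith(prefix):
--             return validate_key_combination(key_str[len(prefix):])
--     return (len(key_str) == 1 and key_str.isalnum()) or key_str in _VALID_SPECIAL
-- ===== Notes on version B (the rewrite author's own statement) =====
-- stated objective: simpler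
-- what changed: A splits the string into a list of parts and loop-checks all-but-last against the modifier set; B never materialises a part list: it recursively strips leading modifier-plus prefixes and applies the final-key test to the remainder.
import Mathlib
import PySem

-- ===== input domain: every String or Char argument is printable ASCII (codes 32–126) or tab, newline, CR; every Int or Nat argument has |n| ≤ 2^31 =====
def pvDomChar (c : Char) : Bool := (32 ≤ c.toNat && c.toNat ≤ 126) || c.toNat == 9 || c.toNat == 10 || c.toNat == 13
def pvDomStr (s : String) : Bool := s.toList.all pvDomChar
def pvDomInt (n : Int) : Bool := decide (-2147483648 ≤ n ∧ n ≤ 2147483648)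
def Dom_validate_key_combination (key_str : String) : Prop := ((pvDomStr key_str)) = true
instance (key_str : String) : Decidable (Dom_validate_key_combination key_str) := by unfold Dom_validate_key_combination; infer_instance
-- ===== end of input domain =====

-- B replaces A's split-into-parts pass by recursive stripping of modifier prefixes (simpler/idiomatic; same cost).

-- ===== PORT A =====
-- valid_modifiers = {'ctrl', 'shift', 'alt'}
def pvValidModifiers : PySem.Set (List Char) :=
  PySem.Set.ofList ["ctrl".toList, "shift".toList, "alt".toList]

-- valid_special = {...}
def pvValidSpecial : PySem.Set (List Char) :=
  PySem.Set.ofList ["space".toList, "enter".toList, "tab".toList, "esc".toList,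
    "backspace".toList, "delete".toList, "insert".toList,
    "up".toList, "down".toList, "left".toList, "right".toList,
    "home".toList, "end".toList, "page_up".toList, "page_down".toList,
    "f1".toList, "f2".toList, "f3".toList, "f4".toList, "f5".toList, "f6".toList,
    "f7".toList, "f8".toList, "f9".toList, "f10".toList, "f11".toList, "f12".toList]

def validate_key_combination (key_str : String) : Bool :=
  let s := key_str.toList
  -- if not key_str: return False
  if s = [] then false
  else
    -- parts = key_str.split('+')
    let parts := PySem.Chars.splitOn s ['+']
    -- if len(parts) > 1: for mod in parts[:-1]: if mod not in valid_modifiers: return False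
    let modsOk : Bool :=
      if 1 < parts.length then
        (PySem.List.slice parts none (some (-1))).all (fun m => pvValidModifiers.contains m)
      else true
    if !modsOk then false
    else
      -- last_part = parts[-1]  (parts from split is never empty)
      let last_part := PySem.List.pyGetD parts (-1) []
      if last_part.length = 1 && PySem.Chars.strIsalnum last_part then true
      else if pvValidSpecial.contains last_part then true
      else false

-- ===== PORT B =====
-- _VALID_SPECIAL in Source B is the same literal set as A's valid_special (pvValidSpecial above)
-- Source B's final test: (len(key_str) == 1 and key_str.isalnum()) or key_str in _VALID_SPECIAL
def pvKeyOk (s : List Char) : Bool :=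
  (s.length = 1 && PySem.Chars.strIsalnum s) || pvValidSpecial.contains s

-- Source B's recursion: startswith('ctrl+'/'shift+'/'alt+') → recurse on the stripped rest
def pvStripMods : List Char → Bool
  | 'c' :: 't' :: 'r' :: 'l' :: '+' :: rest => pvStripMods rest
  | 's' :: 'h' :: 'i' :: 'f' :: 't' :: '+' :: rest => pvStripMods rest
  | 'a' :: 'l' :: 't' :: '+' :: rest => pvStripMods rest
  | s => pvKeyOk s

def validate_key_combination_alt (key_str : String) : Bool :=
  pvStripMods key_str.toList

-- ===== PRECONDITION & SPEC =====
def Spec_validate_key_combination (key_str : String) (out : Bool) : Prop := out = validate_key_combination_alt key_str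
instance (key_str : String) (out : Bool) : Decidable (Spec_validate_key_combination key_str out) := by unfold Spec_validate_key_combination; infer_instance

-- ===== CLAIM (what is proved, stated in full; the proofs are below) =====
def Claim_equal_validate_key_combination : Prop := ∀ (key_str : String), Dom_validate_key_combination key_str → Spec_validate_key_combination key_str (validate_key_combination key_str)

-- ===== LEMMAS AND PROOFS =====

-- simple recursive model of s.split('+')
def pvGlue (x : List Char) : List (List Char) → List (List Char)
  | p :: ps => (x ++ p) :: ps
  | [] => [x]

def pvSplitPlus : List Char → List (List Char)
  | [] => [[]]
  | c :: rest => if c = '+' then [] :: pvSplitPlus rest else pvGlue [c] (pvSplitPlus rest)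

-- A's result after the split, as a function of the part list
def pvF (parts : List (List Char)) : Bool :=
  parts.dropLast.all (fun m => pvValidModifiers.contains m) && pvKeyOk (parts.getLast?.getD [])

lemma pvSplitPlus_ne_nil (s : List Char) : pvSplitPlus s ≠ [] := by
  induction s with
  | nil => simp [pvSplitPlus]
  | cons c rest ih =>
    simp only [pvSplitPlus]
    split_ifs
    · simp
    · cases h : pvSplitPlus rest <;> simp [pvGlue]

lemma pvGlue_glue (x : List Char) (c : Char) (L : List (List Char)) :
    pvGlue (x ++ [c]) L = pvGlue x (pvGlue [c] L) := by
  cases L <;> simp [pvGlue]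

lemma pvGlue_nil (L : List (List Char)) (h : L ≠ []) : pvGlue [] L = L := by
  cases L <;> simp [pvGlue] at *

lemma pvGo_eq : ∀ (fuel : Nat) (l cur : List Char) (acc : List (List Char)),
    l.length < fuel →
    PySem.Chars.splitOn.go ['+'] fuel l cur acc = acc.reverse ++ pvGlue cur.reverse (pvSplitPlus l) := by
  intro fuel
  induction fuel with
  | zero => intro l cur acc h; omega
  | succ fuel ih =>
    intro l cur acc h
    cases l with
    | nil => simp [PySem.Chars.splitOn.go, pvSplitPlus, pvGlue]
    | cons c rest =>
      by_cases hc : c = '+'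
      · subst hc
        rw [PySem.Chars.splitOn.go]
        simp only [List.isPrefixOf, List.length]
        rw [if_pos (by decide)]
        simp only [List.drop]
        rw [ih rest [] (cur.reverse :: acc) (by simp at h; omega)]
        simp only [pvSplitPlus, if_true, List.reverse_nil]
        rw [pvGlue_nil _ (pvSplitPlus_ne_nil rest)]
        simp [pvGlue]
      · rw [PySem.Chars.splitOn.go]
        rw [if_neg (by simp [List.isPrefixOf]; intro h'; exact hc h'.symm)]
        rw [ih rest (c :: cur) acc (by simp at h ⊢; omega)]
        simp only [pvSplitPlus, if_neg hc, List.reverse_cons]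
        rw [pvGlue_glue]

lemma pvSplitOn_eq (s : List Char) : PySem.Chars.splitOn s ['+'] = pvSplitPlus s := by
  rw [PySem.Chars.splitOn, pvGo_eq (s.length + 1) s [] [] (by omega)]
  simp [pvGlue_nil _ (pvSplitPlus_ne_nil s)]

lemma pvSplitPlus_no_plus (s : List Char) (h : ¬ '+' ∈ s) : pvSplitPlus s = [s] := by
  induction s with
  | nil => rfl
  | cons c rest ih =>
    have hc : ¬ c = '+' := by intro hc; exact h (by simp [hc])
    rw [pvSplitPlus, if_neg hc, ih (by intro hm; exact h (by simp [hm])), pvGlue]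
    simp

lemma pvSplitPlus_first (s : List Char) (h : '+' ∈ s) :
    s = s.takeWhile (· ≠ '+') ++ '+' :: (s.dropWhile (· ≠ '+')).tail ∧
    pvSplitPlus s = s.takeWhile (· ≠ '+') :: pvSplitPlus ((s.dropWhile (· ≠ '+')).tail) := by
  induction s with
  | nil => simp at h
  | cons c rest ih =>
    by_cases hc : c = '+'
    · subst hc
      constructor
      · simp [List.takeWhile, List.dropWhile]
      · rw [pvSplitPlus, if_pos rfl]
        simp [List.takeWhile, List.dropWhile]
    · have hr : '+' ∈ rest := (List.mem_cons.mp h).resolve_left (fun e => hc e.symm)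
      obtain ⟨ih1, ih2⟩ := ih hr
      have ht : (c :: rest).takeWhile (· ≠ '+') = c :: rest.takeWhile (· ≠ '+') := by
        simp [List.takeWhile, hc]
      have hd : (c :: rest).dropWhile (· ≠ '+') = rest.dropWhile (· ≠ '+') := by
        simp [List.dropWhile, hc]
      constructor
      · rw [ht, hd]; exact congrArg (c :: ·) ih1
      · rw [pvSplitPlus, if_neg hc, ih2, ht, hd, pvGlue]
        simp

lemma pvSpecial_mem_no_plus : ∀ x ∈ (pvValidSpecial : List (List Char)), ¬ '+' ∈ x := by decide

lemma pvKeyOk_false_of_plus (s : List Char) (h : '+' ∈ s) : pvKeyOk s = false := by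
  have h2 : pvValidSpecial.contains s = false := by
    by_contra hne
    have hmem : s ∈ (pvValidSpecial : List (List Char)) := by
      have := Bool.of_not_eq_false hne
      simpa [PySem.Set.contains] using this
    exact pvSpecial_mem_no_plus s hmem h
  rw [pvKeyOk, h2, Bool.or_false]
  cases s with
  | nil => simp at h
  | cons c rest =>
    cases rest with
    | nil =>
      have : '+' = c := by simpa using h
      subst this; decide
    | cons d tl => simp

lemma pvIfChain (a b : Bool) : (if a then true else if b then true else false) = (a || b) := by
  cases a <;> cases b <;> rfl

lemma pvF_cons (m : List Char) (L : List (List Char)) (h : L ≠ []) :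
    pvF (m :: L) = (pvValidModifiers.contains m && pvF L) := by
  rw [pvF, pvF, List.dropLast_cons_of_ne_nil h, List.all_cons]
  cases L with
  | nil => exact absurd rfl h
  | cons p ps => simp [Bool.and_assoc]

lemma pvLast_cons (p : List Char) (ps : List (List Char)) :
    PySem.List.pyGetD (p :: ps) (-1) [] = (p :: ps).getLast?.getD [] := by
  rw [PySem.List.pyGetD_neg_one (p :: ps) [] (by simp),
      List.getLast?_eq_some_getLast (by simp : p :: ps ≠ [])]
  rfl

lemma pvBody_eq (parts : List (List Char)) (hne : parts ≠ []) :
    (if !(if 1 < parts.length then (PySem.List.slice parts none (some (-1))).all (fun m => pvValidModifiers.contains m) else true) then false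
     else
       if ((PySem.List.pyGetD parts (-1) []).length = 1 : Bool) && PySem.Chars.strIsalnum (PySem.List.pyGetD parts (-1) []) then true
       else if pvValidSpecial.contains (PySem.List.pyGetD parts (-1) []) then true else false)
    = pvF parts := by
  cases parts with
  | nil => exact absurd rfl hne
  | cons p ps =>
    rw [pvLast_cons, pvIfChain]
    cases ps with
    | nil =>
      rw [show (if 1 < ([p] : List (List Char)).length then (PySem.List.slice [p] none (some (-1))).all (fun m => pvValidModifiers.contains m) else true) = true from if_neg (by simp)]
      simp [pvF, pvKeyOk]
    | cons q qs =>
      rw [show (if 1 < (p :: q :: qs).length then (PySem.List.slice (p :: q :: qs) none (some (-1))).all (fun m => pvValidModifiers.contains m) else true) = (p :: q :: qs).dropLast.all (fun m => pvValidModifiers.contains m) from by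
        rw [if_pos (by simp)]
        simp [PySem.List.slice, List.dropLast_eq_take]]
      cases hb : (p :: q :: qs).dropLast.all (fun m => pvValidModifiers.contains m) with
      | false =>
        rw [if_pos (show (!false) = true from rfl)]
        unfold pvF
        rw [hb, Bool.false_and]
      | true =>
        rw [if_neg (show ¬((!true) = true) from by simp)]
        unfold pvF
        rw [hb, Bool.true_and]
        simp only [pvKeyOk]

lemma pvA_eq (k : String) : validate_key_combination k = pvF (pvSplitPlus k.toList) := by
  rw [validate_key_combination]
  by_cases he : k.toList = []
  · rw [if_pos he, he]
    decide
  · rw [if_neg he]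
    simp only [pvSplitOn_eq]
    exact pvBody_eq _ (pvSplitPlus_ne_nil _)

lemma pvModifiers_eval : (pvValidModifiers : List (List Char)) = ["ctrl".toList, "shift".toList, "alt".toList] := by decide

lemma pvB_eq : ∀ s, pvStripMods s = pvF (pvSplitPlus s) := by
  intro s
  induction s using pvStripMods.induct with
  | case1 rest ih =>
    have hs : pvSplitPlus ('c' :: 't' :: 'r' :: 'l' :: '+' :: rest) = "ctrl".toList :: pvSplitPlus rest := by
      simp [pvSplitPlus, pvGlue]
    rw [pvStripMods, hs, pvF_cons _ _ (pvSplitPlus_ne_nil rest), ih]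
    have : pvValidModifiers.contains "ctrl".toList = true := by decide
    rw [this, Bool.true_and]
  | case2 rest ih =>
    have hs : pvSplitPlus ('s' :: 'h' :: 'i' :: 'f' :: 't' :: '+' :: rest) = "shift".toList :: pvSplitPlus rest := by
      simp [pvSplitPlus, pvGlue]
    rw [pvStripMods, hs, pvF_cons _ _ (pvSplitPlus_ne_nil rest), ih]
    have : pvValidModifiers.contains "shift".toList = true := by decide
    rw [this, Bool.true_and]
  | case3 rest ih =>
    have hs : pvSplitPlus ('a' :: 'l' :: 't' :: '+' :: rest) = "alt".toList :: pvSplitPlus rest := by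
      simp [pvSplitPlus, pvGlue]
    rw [pvStripMods, hs, pvF_cons _ _ (pvSplitPlus_ne_nil rest), ih]
    have : pvValidModifiers.contains "alt".toList = true := by decide
    rw [this, Bool.true_and]
  | case4 s h1 h2 h3 =>
    have hfall : pvStripMods s = pvKeyOk s := by
      rw [pvStripMods.eq_def]
      split
      · exact (h1 _ rfl).elim
      · exact (h2 _ rfl).elim
      · exact (h3 _ rfl).elim
      · rfl
    rw [hfall]
    by_cases hp : '+' ∈ s
    · obtain ⟨hdec, hsp⟩ := pvSplitPlus_first s hp
      rw [hsp, pvF_cons _ _ (pvSplitPlus_ne_nil _)]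
      have hm : pvValidModifiers.contains (s.takeWhile (· ≠ '+')) = false := by
        by_contra hne
        have hmem : s.takeWhile (· ≠ '+') ∈ (pvValidModifiers : List (List Char)) := by
          have := Bool.of_not_eq_false hne
          simpa [PySem.Set.contains] using this
        rw [pvModifiers_eval] at hmem
        simp only [List.mem_cons, List.not_mem_nil, or_false] at hmem
        rcases hmem with hm1 | hm1 | hm1 <;> rw [hm1] at hdec
        · exact h1 _ hdec
        · exact h2 _ hdec
        · exact h3 _ hdec
      rw [hm, Bool.false_and, pvKeyOk_false_of_plus s hp]
    · rw [pvSplitPlus_no_plus s hp]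
      simp [pvF]

-- ===== VERDICT (by name: the statement is the Claim_ definition above) =====
theorem validate_key_combination_spec : Claim_equal_validate_key_combination := by
  intro k _
  show validate_key_combination k = validate_key_combination_alt k
  rw [pvA_eq, validate_key_combination_alt, pvB_eq]
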